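-- pv_equiv track=rewrite | github.com/queelius/computational-explorations | src/universal_patterns.py | avoiding_coloring_count
-- ===== SOURCE A (Python) =====
-- import math
-- from itertools import combinations
-- from typing import List, Tuple, Dict, Any, Optional, Set
--
-- def coprime_edges(n: int) -> List[Tuple[int, int]]:
--     """All coprime pairs (i, j) with 1 <= i < j <= n."""
--     edges = []
--     for i in range(1, n + 1):
--         for j in range(i + 1, n + 1):
--             if math.gcd(i, j) == 1:
--                 edges.append((i, j))
--     return edges
--
-- def avoiding_coloring_count(n: int, k: int) -> int:
--     """Count 2-colorings of coprime edges of [n] with no monochromatic K_k.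
--
--     Exact for small n (exhaustive enumeration).
--     Returns -1 if too large to enumerate.
--     """
--     edges = coprime_edges(n)
--     if not edges:
--         return 1  # trivially, the empty coloring
--
--     num_edges = len(edges)
--     # For k=3 we check C(n,3) subsets per coloring; k=4 is much heavier.
--     # Keep total work under ~50M by limiting edges based on k.
--     max_edges = 21 if k <= 3 else 15
--     if num_edges > max_edges:
--         return -1  # too many to enumerate
--
--     # Precompute cliques: find all K_k in the coprime graph and map to edge indices
--     edge_index = {e: idx for idx, e in enumerate(edges)}
--     vertices = list(range(1, n + 1))
--     cliques = []  # each clique is a list of edge indices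
--     for subset in combinations(vertices, k):
--         all_coprime = True
--         clique_edges = []
--         for i in range(k):
--             for j in range(i + 1, k):
--                 e = (min(subset[i], subset[j]), max(subset[i], subset[j]))
--                 if e not in edge_index:
--                     all_coprime = False
--                     break
--                 clique_edges.append(edge_index[e])
--             if not all_coprime:
--                 break
--         if all_coprime:
--             cliques.append(clique_edges)
--
--     if not cliques:
--         return 2**num_edges  # no cliques => all colorings avoid
--
--     count = 0
--     for bits in range(2**num_edges):
--         has_mono = False
--         for clique_edges in cliques:
--             # Check if all edges in clique have same color
--             first_color = (bits >> clique_edges[0]) & 1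
--             if all((bits >> idx) & 1 == first_color for idx in clique_edges[1:]):
--                 has_mono = True
--                 break
--         if not has_mono:
--             count += 1
--
--     return count
-- ===== SOURCE B (Python) =====
-- import math
-- from itertools import combinations
--
-- def avoiding_coloring_count(n: int, k: int) -> int:
--     """Count 2-colorings of coprime edges of [n] with no monochromatic K_k.
--
--     Same contract as the exhaustive version (empty graph -> 1, too many
--     edges -> -1, no cliques -> 2**E), but counts by a backtracking search
--     over the edges with early pruning: whenever the edge just colored
--     completes a clique, the subtree is cut if that clique became
--     monochromatic.
--     """
--     edges = [(i, j) for i in range(1, n + 1) for j in range(i + 1, n + 1)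
--              if math.gcd(i, j) == 1]
--     if not edges:
--         return 1
--     E = len(edges)
--     max_edges = 21 if k <= 3 else 15
--     if E > max_edges:
--         return -1
--
--     edge_index = {e: idx for idx, e in enumerate(edges)}
--     cliques = []
--     for subset in combinations(range(1, n + 1), k):
--         try:
--             ce = [edge_index[(min(a, b), max(a, b))]
--                   for a, b in combinations(subset, 2)]
--         except KeyError:
--             continue
--         cliques.append(ce)
--
--     if not cliques:
--         return 2 ** E
--
--     # cliques completed exactly when edge i receives its color
--     by_last = [[c for c in cliques if max(c) == i] for i in range(E)]
--
--     color = [0] * E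
--
--     def go(i):
--         if i == E:
--             return 1
--         total = 0
--         for b in (0, 1):
--             color[i] = b
--             if not any(all(color[j] == color[c[0]] for j in c)
--                        for c in by_last[i]):
--                 total += go(i + 1)
--         return total
--
--     return go(0)
-- ===== Notes on version B (the rewrite author's own statement) =====
-- stated objective: alternative
-- what changed: The brute-force loop over all 2**E bitmask colorings checking every clique is replaced by a recursive backtracking search that colors edges 0..E-1 one at a time and, via an index of cliques keyed by their largest edge, prunes a whole subtree as soon as a just-completed clique is monochromatic (guards and precomputation keep A's contract: empty->1, too many edges->-1, no cliques->2**E); the pruning wins only on the enumerable instances (e.g. n=8,k=3), not on large n where both return -1 after the edge count.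
import Mathlib
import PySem

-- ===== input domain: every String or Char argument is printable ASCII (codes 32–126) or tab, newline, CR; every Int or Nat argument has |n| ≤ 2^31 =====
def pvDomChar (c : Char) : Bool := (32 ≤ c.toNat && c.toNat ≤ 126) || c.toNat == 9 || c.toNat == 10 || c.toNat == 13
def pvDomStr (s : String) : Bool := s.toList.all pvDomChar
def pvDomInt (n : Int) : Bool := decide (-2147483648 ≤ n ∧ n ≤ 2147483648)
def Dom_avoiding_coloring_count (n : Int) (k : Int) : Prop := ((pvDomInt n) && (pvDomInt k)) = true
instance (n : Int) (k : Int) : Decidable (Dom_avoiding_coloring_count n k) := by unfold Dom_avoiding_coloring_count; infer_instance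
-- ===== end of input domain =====

-- B replaces A's brute-force loop over all 2^E edge colorings by a backtracking search
-- that colors edges one at a time and prunes a subtree as soon as a completed clique is
-- monochromatic (objective: alternative; the guards 1 / -1 / 2^E are part of A's contract).

-- ===== PORT A =====

-- helpers shared by both ports (identical code in both Pythons):
-- the (subset[i], subset[j]) pairs, i < j, in the order of A's nested loops
-- (= itertools.combinations(subset, 2) in B)
def pairList : List Int → List (Int × Int)
  | [] => []
  | x :: xs => xs.map (fun y => (x, y)) ++ pairList xs

-- {e: idx for idx, e in enumerate(edges)}
def edgeIndex (edges : List (Int × Int)) : PySem.Dict (Int × Int) Int :=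
  (PySem.List.enumerate edges).foldl (fun d p => d.insert p.2 p.1) PySem.Dict.empty

-- A's coprime_edges: nested for-loops appending
def coprime_edges_A (n : Int) : List (Int × Int) :=
  (PySem.List.pyRange 1 (n + 1)).foldl (fun edges i =>
    (PySem.List.pyRange (i + 1) (n + 1)).foldl (fun edges j =>
      if ((Int.gcd i j : Int) == 1) then edges ++ [(i, j)] else edges) edges) []

-- A's inner double loop over a subset with early break on a missing edge
def checkCliqueA (d : PySem.Dict (Int × Int) Int) : List (Int × Int) → Option (List Int)
  | [] => some []
  | (a, b) :: rest =>
    match d.get? (min a b, max a b) with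
    | none => none
    | some idx =>
      match checkCliqueA d rest with
      | none => none
      | some ce => some (idx :: ce)

def cliquesA (d : PySem.Dict (Int × Int) Int) (vertices : List Int) (k : Int) : List (List Int) :=
  (PySem.List.combinations vertices k.toNat).foldl
    (fun cl s => match checkCliqueA d (pairList s) with
      | some ce => cl ++ [ce]
      | none => cl) []

-- first_color = (bits >> c[0]) & 1; all((bits >> idx) & 1 == first_color for idx in c[1:])
def monoA (bits : Nat) (c : List Int) : Bool :=
  let first := (bits >>> (c.headD 0).toNat) &&& 1
  (c.drop 1).all (fun idx => (((bits >>> idx.toNat) &&& 1) == first))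

def avoiding_coloring_count (n : Int) (k : Int) : Int :=
  let edges := coprime_edges_A n
  if edges = [] then 1
  else
    let numEdges := edges.length
    let maxEdges : Int := if k ≤ 3 then 21 else 15
    if (numEdges : Int) > maxEdges then -1
    else
      let d := edgeIndex edges
      let cliques := cliquesA d (PySem.List.pyRange 1 (n + 1)) k
      if cliques = [] then (2 : Int) ^ numEdges
      else
        (List.range (2 ^ numEdges)).foldl
          (fun count bits =>
            if cliques.any (fun c => monoA bits c) then count else count + 1) 0

-- ===== PORT B =====

-- B's comprehension [(i, j) for i in … for j in … if gcd == 1]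
def coprime_edges_B (n : Int) : List (Int × Int) :=
  (PySem.List.pyRange 1 (n + 1)).flatMap (fun i =>
    ((PySem.List.pyRange (i + 1) (n + 1)).filter (fun j => ((Int.gcd i j : Int) == 1))).map
      (fun j => (i, j)))

-- B's try/except-KeyError comprehension over combinations(subset, 2)
def cliqueOfB (d : PySem.Dict (Int × Int) Int) (s : List Int) : Option (List Int) :=
  (pairList s).mapM (fun p => d.get? (min p.1 p.2, max p.1 p.2))

def cliquesB (d : PySem.Dict (Int × Int) Int) (vertices : List Int) (k : Int) : List (List Int) :=
  (PySem.List.combinations vertices k.toNat).foldl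
    (fun cl s => match cliqueOfB d s with
      | some ce => cl ++ [ce]
      | none => cl) []

-- max(c) for a nonempty list of nonnegative ints
def listMaxI (c : List Int) : Int := c.foldl max 0

-- by_last = [[c for c in cliques if max(c) == i] for i in range(E)]
def byLastB (cliques : List (List Int)) (E : Nat) : List (List (List Int)) :=
  (List.range E).map (fun (i : Nat) => cliques.filter (fun c => listMaxI c == (i : Int)))

-- all(color[j] == color[c[0]] for j in c)
def monoB (color : List Int) (c : List Int) : Bool :=
  c.all (fun j => PySem.List.pyGetD color j 0 == PySem.List.pyGetD color (c.headD 0) 0)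

-- go(i): i = len(color); fuel = E - i; branch b pruned if a clique completed at i is mono
def goB (byl : List (List (List Int))) (color : List Int) : Nat → Int
  | 0 => 1
  | fuel + 1 =>
    let cls := byl.getD color.length []
    let b0 := if cls.any (fun c => monoB (color ++ [0]) c) then 0 else goB byl (color ++ [0]) fuel
    let b1 := if cls.any (fun c => monoB (color ++ [1]) c) then 0 else goB byl (color ++ [1]) fuel
    b0 + b1

def avoiding_coloring_count_alt (n : Int) (k : Int) : Int :=
  let edges := coprime_edges_B n
  if edges = [] then 1
  else
    let numEdges := edges.length
    let maxEdges : Int := if k ≤ 3 then 21 else 15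
    if (numEdges : Int) > maxEdges then -1
    else
      let d := edgeIndex edges
      let cliques := cliquesB d (PySem.List.pyRange 1 (n + 1)) k
      if cliques = [] then (2 : Int) ^ numEdges
      else goB (byLastB cliques numEdges) [] numEdges

-- ===== PRECONDITION & SPEC =====
-- Pre_ excludes only inputs on which A raises: for 2 ≤ n ≤ 8 and k ≤ 1 A hits
-- IndexError (k = 0, 1: the empty "clique" has no edges[0]) or ValueError (k < 0,
-- from combinations); everywhere else A returns normally.
def Pre_avoiding_coloring_count (n : Int) (k : Int) : Prop := n ≤ 1 ∨ 9 ≤ n ∨ 2 ≤ k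
instance (n : Int) (k : Int) : Decidable (Pre_avoiding_coloring_count n k) := by
  unfold Pre_avoiding_coloring_count; infer_instance

def pvWitness_avoiding_coloring_count : Int × Int := (4, 3)

def Spec_avoiding_coloring_count (n : Int) (k : Int) (out : Int) : Prop :=
  out = avoiding_coloring_count_alt n k
instance (n : Int) (k : Int) (out : Int) : Decidable (Spec_avoiding_coloring_count n k out) := by
  unfold Spec_avoiding_coloring_count; infer_instance

-- ===== CLAIM (what is proved, stated in full; the proofs are below) =====
def Claim_equal_avoiding_coloring_count : Prop := ∀ (n : Int) (k : Int),
  Dom_avoiding_coloring_count n k → Pre_avoiding_coloring_count n k →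
  Spec_avoiding_coloring_count n k (avoiding_coloring_count n k)

-- ===== LEMMAS AND PROOFS =====

def valB : List Int → Nat
  | [] => 0
  | x :: xs => x.toNat + 2 * valB xs

theorem listMaxI_nonneg (c : List Int) : 0 ≤ listMaxI c :=
  (PySem.List.le_foldl_max c 0).1

theorem edges_eq (n : Int) : coprime_edges_A n = coprime_edges_B n := by
  unfold coprime_edges_A coprime_edges_B
  rw [PySem.List.foldl_congr_mem' _ _
    (fun edges i => edges ++ ((PySem.List.pyRange (i + 1) (n + 1)).filter
        (fun j => ((Int.gcd i j : Int) == 1))).map (fun j => (i, j))) _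
    (by intro i _ acc
        exact PySem.List.foldl_append_if (fun j => ((Int.gcd i j : Int) == 1)) (fun j => (i, j)) _ acc),
    PySem.List.foldl_append_eq_flatMap]
  simp

theorem cliqueOfB_eq (d : PySem.Dict (Int × Int) Int) (ps : List (Int × Int)) :
    ps.mapM (fun p => d.get? (min p.1 p.2, max p.1 p.2)) = checkCliqueA d ps := by
  induction ps with
  | nil => rfl
  | cons p rest ih =>
    obtain ⟨a, b⟩ := p
    rw [List.mapM_cons]
    simp only [checkCliqueA]
    cases d.get? (min a b, max a b) <;> simp [← ih] <;> cases rest.mapM (fun p => d.get? (min p.1 p.2, max p.1 p.2)) <;> rfl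

theorem cliques_eq (d : PySem.Dict (Int × Int) Int) (v : List Int) (k : Int) :
    cliquesB d v k = cliquesA d v k := by
  unfold cliquesB cliquesA cliqueOfB
  simp only [cliqueOfB_eq]

theorem edges_nil_of_le_one (n : Int) (h : n ≤ 1) : coprime_edges_B n = [] := by
  unfold coprime_edges_B
  rcases lt_or_ge n 1 with h1 | h1
  · rw [PySem.List.pyRange_one_eq_nil (by omega)]; rfl
  · have : n = 1 := le_antisymm h h1
    subst this; decide

set_option maxRecDepth 40000 in

set_option maxRecDepth 40000 in
theorem edges_big (n : Int) (h : 9 ≤ n) : 22 ≤ (coprime_edges_B n).length := by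
  rcases le_or_gt n 22 with h2 | h2
  · interval_cases n <;> decide
  · unfold coprime_edges_B
    rw [PySem.List.pyRange_one_cons (by omega : (1:Int) < n + 1)]
    rw [List.flatMap_cons, List.length_append]
    have hf : (PySem.List.pyRange (1 + 1) (n + 1)).filter (fun j => ((Int.gcd 1 j : Int) == 1))
        = PySem.List.pyRange (1 + 1) (n + 1) := by
      apply List.filter_eq_self.mpr
      intro j _; simp [Int.one_gcd]
    rw [hf, List.length_map]
    have hsplit : PySem.List.pyRange (1 + 1) (n + 1)
        = PySem.List.pyRange 2 24 ++ PySem.List.pyRange 24 (n + 1) := by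
      have := PySem.List.pyRange_one_append 2 24 (n + 1) (by omega) (by omega)
      simpa using this
    rw [hsplit, List.length_append]
    have : (PySem.List.pyRange 2 24).length = 22 := by decide
    omega

theorem get?_foldl_insert_bound (P : Int → Prop) (l : List (Int × (Int × Int)))
    (d : PySem.Dict (Int × Int) Int)
    (hd : ∀ e v, d.get? e = some v → P v) (hl : ∀ p ∈ l, P p.1) :
    ∀ e v, ((l.foldl (fun d p => d.insert p.2 p.1) d).get? e = some v) → P v := by
  induction l generalizing d with
  | nil => exact hd
  | cons p rest ih =>
    intro e v h
    refine ih (d.insert p.2 p.1) ?_ (fun q hq => hl q (List.mem_cons_of_mem _ hq)) e v h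
    intro e' v' h'
    rw [PySem.Dict.get?_insert] at h'
    split at h'
    · cases h'; exact hl p (List.mem_cons_self ..)
    · exact hd e' v' h'

theorem enumerate_fst_bound {α : Type} (xs : List α) (s : Int) :
    ∀ p ∈ PySem.List.enumerate xs s, s ≤ p.1 ∧ p.1 < s + xs.length := by
  induction xs generalizing s with
  | nil => simp [PySem.List.enumerate]
  | cons x t ih =>
    intro p hp
    simp only [PySem.List.enumerate, List.mem_cons] at hp
    rcases hp with rfl | hp
    · simp
    · have := ih (s + 1) p hp
      simp only [List.length_cons]
      push_cast
      push_cast at this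
      omega

theorem edgeIndex_bound (edges : List (Int × Int)) (e : Int × Int) (v : Int)
    (h : (edgeIndex edges).get? e = some v) : 0 ≤ v ∧ v < (edges.length : Int) := by
  rcases Nat.eq_zero_or_pos edges.length with h0 | h0
  · rw [List.length_eq_zero_iff.mp h0] at h
    simp [edgeIndex, PySem.List.enumerate, PySem.Dict.get?_empty] at h
  · refine get?_foldl_insert_bound (fun v => 0 ≤ v ∧ v < (edges.length : Int)) _ _ ?_ ?_ e v h
    · intro e' v' h'; rw [PySem.Dict.get?_empty] at h'; cases h'
    · intro p hp
      have := enumerate_fst_bound edges 0 p hp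
      omega

theorem checkCliqueA_length (d : PySem.Dict (Int × Int) Int) :
    ∀ ps ce, checkCliqueA d ps = some ce → ce.length = ps.length := by
  intro ps
  induction ps with
  | nil => intro ce h; cases h; rfl
  | cons p rest ih =>
    obtain ⟨a, b⟩ := p
    intro ce h
    simp only [checkCliqueA] at h
    cases hg : d.get? (min a b, max a b) <;> rw [hg] at h
    · cases h
    · cases hr : checkCliqueA d rest <;> rw [hr] at h
      · cases h
      · cases h; simpa using ih _ hr

theorem checkCliqueA_bound (d : PySem.Dict (Int × Int) Int) (E : Nat)
    (hd : ∀ e v, d.get? e = some v → 0 ≤ v ∧ v < (E : Int)) :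
    ∀ ps ce, checkCliqueA d ps = some ce → ∀ j ∈ ce, 0 ≤ j ∧ j < (E : Int) := by
  intro ps
  induction ps with
  | nil => intro ce h; cases h; simp
  | cons p rest ih =>
    obtain ⟨a, b⟩ := p
    intro ce h
    simp only [checkCliqueA] at h
    cases hg : d.get? (min a b, max a b) <;> rw [hg] at h
    · cases h
    · cases hr : checkCliqueA d rest <;> rw [hr] at h
      · cases h
      · cases h
        intro j hj
        rcases List.mem_cons.mp hj with rfl | hj
        · exact hd _ _ hg
        · exact ih _ hr j hj

theorem mem_cliquesA (d : PySem.Dict (Int × Int) Int) (v : List Int) (k : Int) (c : List Int) :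
    c ∈ cliquesA d v k ↔ ∃ s ∈ PySem.List.combinations v k.toNat,
      checkCliqueA d (pairList s) = some c := by
  have key : ∀ (L : List (List Int)) (acc : List (List Int)),
      L.foldl (fun cl s => match checkCliqueA d (pairList s) with
        | some ce => cl ++ [ce] | none => cl) acc
      = acc ++ L.filterMap (fun s => checkCliqueA d (pairList s)) := by
    intro L
    induction L with
    | nil => simp
    | cons x t ih =>
      intro acc
      simp only [List.foldl_cons, List.filterMap_cons]
      cases checkCliqueA d (pairList x) <;> simp [ih]
  unfold cliquesA
  rw [key]
  simp [List.mem_filterMap]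

theorem pairList_length_pos (s : List Int) (h : 2 ≤ s.length) : pairList s ≠ [] := by
  match s, h with
  | a :: b :: t, _ => simp [pairList]

theorem val_lt (l : List Int) (h01 : ∀ x ∈ l, x = 0 ∨ x = 1) : valB l < 2 ^ l.length := by
  induction l with
  | nil => simp [valB]
  | cons x xs ih =>
    have hx := h01 x (List.mem_cons_self ..)
    have h2 := ih (fun y hy => h01 y (List.mem_cons_of_mem _ hy))
    have hxt : x.toNat ≤ 1 := by rcases hx with rfl | rfl <;> decide
    simp only [valB, List.length_cons, pow_succ]
    omega

theorem val_append (l : List Int) (b : Int) :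
    valB (l ++ [b]) = valB l + b.toNat * 2 ^ l.length := by
  induction l with
  | nil => simp [valB]
  | cons x xs ih =>
    simp only [List.cons_append, valB, ih, List.length_cons, pow_succ]
    ring

theorem bit_val (l : List Int) (h01 : ∀ x ∈ l, x = 0 ∨ x = 1) (j : Nat) (hj : j < l.length) :
    (valB l >>> j) &&& 1 = (l.getD j 0).toNat := by
  induction l generalizing j with
  | nil => simp at hj
  | cons x xs ih =>
    have hx := h01 x (List.mem_cons_self ..)
    have hxt : x.toNat ≤ 1 := by rcases hx with rfl | rfl <;> decide
    cases j with
    | zero =>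
      simp only [valB, Nat.shiftRight_zero, Nat.and_one_is_mod, List.getD_cons_zero]
      omega
    | succ j =>
      simp only [valB, List.getD_cons_succ]
      rw [← ih (fun y hy => h01 y (List.mem_cons_of_mem _ hy)) j (by simpa using hj)]
      simp only [Nat.shiftRight_eq_div_pow]
      congr 1
      rw [pow_succ, Nat.mul_comm (2^j) 2, ← Nat.div_div_eq_div_mul]
      congr 1
      omega

theorem bit_stable (a m s j : Nat) (ha : a < 2 ^ s) (hj : j < s) :
    ((a + m * 2 ^ s) >>> j) &&& 1 = (a >>> j) &&& 1 := by
  simp only [Nat.shiftRight_eq_div_pow, Nat.and_one_is_mod]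
  have hs : 2 ^ s = 2 ^ (s - j) * 2 ^ j := by
    rw [← pow_add]; congr 1; omega
  rw [hs, ← Nat.mul_assoc, Nat.add_mul_div_right _ _ (Nat.two_pow_pos j)]
  have h1 : 1 ≤ s - j := by omega
  have : 2 ^ (s - j) = 2 * 2 ^ (s - j - 1) := by
    rw [← pow_succ']
    congr 1; omega
  rw [this]
  have h2 : m * (2 * 2 ^ (s - j - 1)) = 2 * (m * 2 ^ (s - j - 1)) := by ring
  rw [h2, Nat.add_mul_mod_self_left]

theorem le_listMaxI (c : List Int) (j : Int) (hj : j ∈ c) : j ≤ listMaxI c :=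
  (PySem.List.le_foldl_max c 0).2 j hj

theorem listMaxI_lt (c : List Int) (E : Nat) (hE : 0 < E)
    (hb : ∀ j ∈ c, j < (E : Int)) : listMaxI c < (E : Int) := by
  rcases PySem.List.foldl_max_mem c 0 with h | h
  · unfold listMaxI; rw [h]; exact_mod_cast hE
  · exact hb _ h

theorem byLast_getD (cliques : List (List Int)) (E i : Nat) (hi : i < E) :
    (byLastB cliques E).getD i [] = cliques.filter (fun c => listMaxI c == (i : Int)) := by
  unfold byLastB
  rw [PySem.List.getD_map_range _ _ _ _ hi]

theorem countP_range_double (N : Nat) (f : Nat → Bool) :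
    (List.range (2 * N)).countP f
      = (List.range N).countP (fun m => f (2 * m)) + (List.range N).countP (fun m => f (2 * m + 1)) := by
  induction N with
  | zero => simp
  | succ N ih =>
    have h2 : 2 * (N + 1) = (2 * N + 1) + 1 := by omega
    rw [h2, List.range_succ, List.range_succ, List.range_succ,
      List.countP_append, List.countP_append, List.countP_append, ih]
    simp [List.countP_cons]
    omega

theorem all_congr_mem {α : Type} (l : List α) (f g : α → Bool)
    (h : ∀ x ∈ l, f x = g x) : l.all f = l.all g := by
  induction l with
  | nil => rfl
  | cons x t ih =>
    simp only [List.all_cons, h x (List.mem_cons_self ..),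
      ih (fun y hy => h y (List.mem_cons_of_mem _ hy))]

theorem beq_toNat (a b : Int) (ha : 0 ≤ a) (hb : 0 ≤ b) : (a.toNat == b.toNat) = (a == b) := by
  by_cases h : a = b
  · subst h; simp
  · have hne : a.toNat ≠ b.toNat := by omega
    simp [h, hne]

theorem elem_bit (l : List Int) (h01 : ∀ x ∈ l, x = 0 ∨ x = 1) (m : Nat) (j : Int)
    (h0 : 0 ≤ j) (hj : j.toNat < l.length) :
    ((valB l + m * 2 ^ l.length) >>> j.toNat) &&& 1 = (PySem.List.pyGetD l j 0).toNat := by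
  rw [bit_stable _ _ _ _ (val_lt l h01) hj, bit_val l h01 j.toNat hj,
    PySem.List.pyGetD_eq_getElem l 0 h0 (by omega), List.getD_eq_getElem l 0 hj]

theorem monoA_eq_monoB (l : List Int) (h01 : ∀ x ∈ l, x = 0 ∨ x = 1) (m : Nat)
    (c : List Int) (hc : c ≠ []) (hb : ∀ j ∈ c, 0 ≤ j ∧ j.toNat < l.length) :
    monoA (valB l + m * 2 ^ l.length) c = monoB l c := by
  obtain ⟨h, t, rfl⟩ : ∃ h t, c = h :: t := by
    cases c with
    | nil => exact absurd rfl hc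
    | cons h t => exact ⟨h, t, rfl⟩
  have hh := hb h (List.mem_cons_self ..)
  have hnn : ∀ x ∈ l, 0 ≤ x := fun x hx => by rcases h01 x hx with rfl | rfl <;> decide
  simp only [monoA, monoB, List.headD_cons, List.drop_succ_cons, List.drop_zero, List.all_cons,
    beq_self_eq_true, Bool.true_and]
  apply all_congr_mem
  intro j hj
  have hjb := hb j (List.mem_cons_of_mem _ hj)
  rw [elem_bit l h01 m j hjb.1 hjb.2, elem_bit l h01 m h hh.1 hh.2]
  have g1 : 0 ≤ PySem.List.pyGetD l j 0 := by
    rw [PySem.List.pyGetD_eq_getElem l 0 hjb.1 (by omega)]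
    exact hnn _ (List.getElem_mem _)
  have g2 : 0 ≤ PySem.List.pyGetD l h 0 := by
    rw [PySem.List.pyGetD_eq_getElem l 0 hh.1 (by omega)]
    exact hnn _ (List.getElem_mem _)
  exact beq_toNat _ _ g1 g2

theorem monoB_append (l e c : List Int) (hc : c ≠ [])
    (hb : ∀ j ∈ c, 0 ≤ j ∧ j.toNat < l.length) : monoB (l ++ e) c = monoB l c := by
  have key : ∀ j : Int, 0 ≤ j → j.toNat < l.length →
      PySem.List.pyGetD (l ++ e) j 0 = PySem.List.pyGetD l j 0 := by
    intro j h0 hj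
    rw [PySem.List.pyGetD_eq_getElem _ 0 h0 (by simp; omega),
      PySem.List.pyGetD_eq_getElem l 0 h0 (by omega), List.getElem_append_left hj]
  have hh := hb (c.headD 0) (by cases c with | nil => exact absurd rfl hc | cons a t => simp)
  unfold monoB
  apply all_congr_mem
  intro j hj
  have hjb := hb j hj
  rw [key j hjb.1 hjb.2, key _ hh.1 hh.2]

theorem go_inv (cliques : List (List Int)) (E : Nat) (hE : 0 < E)
    (Hne : ∀ c ∈ cliques, c ≠ [])
    (Hb : ∀ c ∈ cliques, ∀ j ∈ c, 0 ≤ j ∧ j < (E : Int)) :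
    ∀ fuel color, color.length + fuel = E → (∀ x ∈ color, x = 0 ∨ x = 1) →
    (∀ c ∈ cliques, listMaxI c < (color.length : Int) → monoB color c = false) →
    goB (byLastB cliques E) color fuel
      = ((List.range (2 ^ fuel)).countP
          (fun m => !cliques.any (fun c => monoA (valB color + m * 2 ^ color.length) c)) : Int) := by
  intro fuel
  induction fuel with
  | zero =>
    intro color hlen h01 H
    have hcl : color.length = E := by omega
    have hany : cliques.any (fun c => monoA (valB color + 0 * 2 ^ color.length) c) = false := by
      rw [List.any_eq_false]
      intro c hcmem
      rw [monoA_eq_monoB color h01 0 c (Hne c hcmem)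
        (fun j hj => ⟨(Hb c hcmem j hj).1, by have := Hb c hcmem j hj; omega⟩)]
      simp only [Bool.not_eq_true]
      apply H c hcmem
      rw [hcl]
      exact listMaxI_lt c E hE (fun j hj => (Hb c hcmem j hj).2)
    simp only [goB, pow_zero, List.range_one, List.countP_cons, List.countP_nil, hany]
    norm_num
  | succ fuel ih =>
    intro color hlen h01 H
    have hiE : color.length < E := by omega
    -- branch lemma
    have hbranch : ∀ (b : Int) (bn : Nat), ((b = 0 ∧ bn = 0) ∨ (b = 1 ∧ bn = 1)) →
        (if (cliques.filter (fun c => listMaxI c == (color.length : Int))).any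
              (fun c => monoB (color ++ [b]) c) then (0 : Int)
         else goB (byLastB cliques E) (color ++ [b]) fuel)
        = ((List.range (2 ^ fuel)).countP
            (fun m => !cliques.any (fun c =>
              monoA (valB color + (2 * m + bn) * 2 ^ color.length) c)) : Int) := by
      intro b bn hbbn
      have hbtoNat : b.toNat = bn := by rcases hbbn with ⟨rfl, rfl⟩ | ⟨rfl, rfl⟩ <;> rfl
      have hb01 : b = 0 ∨ b = 1 := by rcases hbbn with ⟨rfl, _⟩ | ⟨rfl, _⟩ <;> simp
      have h01' : ∀ x ∈ color ++ [b], x = 0 ∨ x = 1 := by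
        intro x hx
        rcases List.mem_append.mp hx with hx | hx
        · exact h01 x hx
        · simp at hx; subst hx; exact hb01
      have hlen' : (color ++ [b]).length = color.length + 1 := by simp
      have hbits : ∀ m : Nat, valB color + (2 * m + bn) * 2 ^ color.length
          = valB (color ++ [b]) + m * 2 ^ (color ++ [b]).length := by
        intro m
        rw [val_append, hbtoNat, hlen', pow_succ]
        ring
      cases hp : (cliques.filter (fun c => listMaxI c == (color.length : Int))).any
          (fun c => monoB (color ++ [b]) c)
      · rw [if_neg (by simp)]
        have H' : ∀ c ∈ cliques, listMaxI c < ((color ++ [b]).length : Int) →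
            monoB (color ++ [b]) c = false := by
          intro c hcm hlt
          rw [hlen'] at hlt
          rcases lt_or_eq_of_le (by push_cast at hlt ⊢; omega : listMaxI c ≤ (color.length : Int))
            with hlt' | heq
          · have hbound : ∀ j ∈ c, 0 ≤ j ∧ j.toNat < color.length := by
              intro j hj
              refine ⟨(Hb c hcm j hj).1, ?_⟩
              have h1 : j ≤ listMaxI c := le_listMaxI c j hj
              have h2 : 0 ≤ j := (Hb c hcm j hj).1
              omega
            rw [monoB_append color [b] c (Hne c hcm) hbound]
            exact H c hcm hlt'
          · have hcf : c ∈ cliques.filter (fun c => listMaxI c == (color.length : Int)) :=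
              List.mem_filter.mpr ⟨hcm, by simp [heq]⟩
            exact Bool.not_eq_true _ ▸ (by simpa using List.any_eq_false.mp hp c hcf)
        rw [ih (color ++ [b]) (by simp; omega) h01' H']
        congr 1
        apply List.countP_congr
        intro m _
        simp only [hbits m]
      · rw [if_pos rfl]
        symm
        have hz : (List.countP
            (fun m => !cliques.any (fun c =>
              monoA (valB color + (2 * m + bn) * 2 ^ color.length) c))
            (List.range (2 ^ fuel))) = 0 := by
          rw [List.countP_eq_zero]
          intro m _
          obtain ⟨c0, hc0f, hc0m⟩ := List.any_eq_true.mp hp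
          obtain ⟨hc0mem, hc0max⟩ := List.mem_filter.mp hc0f
          have hc0max' : listMaxI c0 = (color.length : Int) := by
            simpa using hc0max
          have hbound : ∀ j ∈ c0, 0 ≤ j ∧ j.toNat < (color ++ [b]).length := by
            intro j hj
            refine ⟨(Hb c0 hc0mem j hj).1, ?_⟩
            have h1 : j ≤ listMaxI c0 := le_listMaxI c0 j hj
            have h2 : 0 ≤ j := (Hb c0 hc0mem j hj).1
            rw [hlen']
            omega
          rw [Bool.not_eq_true, Bool.not_eq_false']
          apply List.any_eq_true.mpr
          refine ⟨c0, hc0mem, ?_⟩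
          rw [hbits m, monoA_eq_monoB _ h01' m c0 (Hne c0 hc0mem) hbound]
          exact hc0m
        rw [hz]
        rfl
    -- assemble the two branches
    have h0 := hbranch 0 0 (Or.inl ⟨rfl, rfl⟩)
    have h1 := hbranch 1 1 (Or.inr ⟨rfl, rfl⟩)
    have hpow : (2 : Nat) ^ (fuel + 1) = 2 * 2 ^ fuel := by rw [pow_succ]; ring
    simp only [goB]
    rw [byLast_getD cliques E color.length hiE, hpow, countP_range_double, h0, h1]
    push_cast
    have e0 : (List.countP (fun m => !cliques.any fun c => monoA (valB color + (2*m+0) * 2 ^ color.length) c) (List.range (2 ^ fuel)))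
      = (List.countP (fun m => !cliques.any fun c => monoA (valB color + 2*m * 2 ^ color.length) c) (List.range (2 ^ fuel))) := by
      apply List.countP_congr; intro m _; norm_num
    rw [e0]

theorem count_eq (cliques : List (List Int)) (E : Nat) (hE : 0 < E)
    (Hne : ∀ c ∈ cliques, c ≠ [])
    (Hb : ∀ c ∈ cliques, ∀ j ∈ c, 0 ≤ j ∧ j < (E : Int)) :
    (List.range (2 ^ E)).foldl
        (fun (count : Int) bits =>
          if cliques.any (fun c => monoA bits c) then count else count + 1) 0
      = goB (byLastB cliques E) [] E := by
  rw [PySem.List.foldl_congr_mem' _ _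
    (fun (count : Int) bits => if !cliques.any (fun c => monoA bits c) then count + 1 else count) _
    (by intro bits _ cnt
        cases h : cliques.any (fun c => monoA bits c) <;> simp [h])]
  rw [PySem.List.foldl_if_add_one]
  rw [go_inv cliques E hE Hne Hb E [] (by simp) (by simp)
    (fun c hc hlt => absurd hlt (not_lt.mpr (listMaxI_nonneg c)))]
  norm_num
  apply List.countP_congr
  intro m _
  simp [valB]

-- ===== VERDICT (by name: the statement is the Claim_ definition above) =====
theorem avoiding_coloring_count_spec : Claim_equal_avoiding_coloring_count := by
  unfold Claim_equal_avoiding_coloring_count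
  intro n k _ hpre
  unfold Spec_avoiding_coloring_count
  unfold avoiding_coloring_count avoiding_coloring_count_alt
  dsimp only
  rw [edges_eq]
  by_cases h1 : coprime_edges_B n = []
  · simp [h1]
  · rw [if_neg h1, if_neg h1]
    by_cases h2 : ((coprime_edges_B n).length : Int) > (if k ≤ 3 then (21 : Int) else 15)
    · rw [if_pos h2, if_pos h2]
    · rw [if_neg h2, if_neg h2, cliques_eq]
      by_cases h3 : cliquesA (edgeIndex (coprime_edges_B n))
          (PySem.List.pyRange 1 (n + 1)) k = []
      · rw [if_pos h3, if_pos h3]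
      · rw [if_neg h3, if_neg h3]
        -- k ≥ 2 on this branch
        have hk2 : 2 ≤ k := by
          rcases hpre with hn | hn | hk
          · exact absurd (edges_nil_of_le_one n hn) h1
          · exfalso
            have hbig := edges_big n hn
            rcases le_or_gt k 3 with hk | hk
            · rw [if_pos hk] at h2; omega
            · rw [if_neg (by omega)] at h2; omega
          · exact hk
        have hE : 0 < (coprime_edges_B n).length := List.length_pos_of_ne_nil h1
        have Hne : ∀ c ∈ cliquesA (edgeIndex (coprime_edges_B n))
            (PySem.List.pyRange 1 (n + 1)) k, c ≠ [] := by
          intro c hc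
          obtain ⟨s, hs, hchk⟩ := (mem_cliquesA _ _ _ c).mp hc
          have hslen : s.length = k.toNat := PySem.List.length_of_mem_combinations hs
          have hp : pairList s ≠ [] := pairList_length_pos s (by omega)
          have hlen := checkCliqueA_length _ _ _ hchk
          intro hcnil
          rw [hcnil] at hlen
          exact hp (List.eq_nil_of_length_eq_zero hlen.symm)
        have Hb : ∀ c ∈ cliquesA (edgeIndex (coprime_edges_B n))
            (PySem.List.pyRange 1 (n + 1)) k, ∀ j ∈ c,
            0 ≤ j ∧ j < ((coprime_edges_B n).length : Int) := by
          intro c hc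
          obtain ⟨s, hs, hchk⟩ := (mem_cliquesA _ _ _ c).mp hc
          exact checkCliqueA_bound _ _ (fun e v h => edgeIndex_bound _ e v h) _ _ hchk
        exact count_eq _ _ hE Hne Hb
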